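-- pv_equiv track=rewrite | github.com/Cognio-so/Ed-Tech | backend/main.py | _parse_enhanced_story_panels
-- ===== SOURCE A (Python) =====
-- from typing import Any, Awaitable, Callable, Dict, List, Literal, Optional
--
-- def _parse_enhanced_story_panels(story_text: str) -> List[Dict[str, str]]:
--     """
--     Helper to parse the story text into structured panels.
--     Adapts logic from comic_generation.py to match the endpoint's expected keys.
--     """
--     panels = []
--     current_panel = {}
--
--     lines = story_text.strip().split('\n')
--     for line in lines:
--         line = line.strip()
--         if not line:
--             continue
--
--         # Detect new panel start (usually numbered list)
--         if line.split('.')[0].isdigit() and 'Panel_Prompt:' in line: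
--             if current_panel and 'prompt' in current_panel:
--                 # Ensure footer exists even if empty
--                 if 'footer_text' not in current_panel:
--                     current_panel['footer_text'] = ""
--                 panels.append(current_panel)
--             current_panel = {}
--
--         if 'Panel_Prompt:' in line:
--             parts = line.split('Panel_Prompt:', 1)
--             if len(parts) > 1:
--                 current_panel['prompt'] = parts[1].strip()
--         elif 'Footer_Text:' in line:
--             parts = line.split('Footer_Text:', 1)
--             if len(parts) > 1:
--                 current_panel['footer_text'] = parts[1].strip()
--
--     # Add the last panel
--     if current_panel and 'prompt' in current_panel:
--         if 'footer_text' not in current_panel: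
--             current_panel['footer_text'] = ""
--         panels.append(current_panel)
--
--     return panels
-- ===== SOURCE B (Python) =====
-- def _parse_enhanced_story_panels(story_text):
--     """Group-then-map parser: pass 1 collects cleaned lines into panel groups
--     (a new group starts at each numbered Panel_Prompt marker); pass 2 turns
--     each group into its panel dict (last occurrence wins, panel emitted only
--     when a prompt was found)."""
--     lines = [s for s in (raw.strip() for raw in story_text.strip().split('\n')) if s]
--     groups = []
--     cur = []
--     for line in lines:
--         if line.split('.')[0].isdigit() and 'Panel_Prompt:' in line:
--             groups.append(cur)
--             cur = []
--         cur.append(line)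
--     groups.append(cur)
--
--     panels = []
--     for group in groups:
--         prompt = None
--         footer = None
--         for line in group:
--             if 'Panel_Prompt:' in line:
--                 prompt = line.split('Panel_Prompt:', 1)[1].strip()
--             elif 'Footer_Text:' in line:
--                 footer = line.split('Footer_Text:', 1)[1].strip()
--         if prompt is not None:
--             panels.append({'prompt': prompt, 'footer_text': footer if footer is not None else ''})
--     return panels
-- ===== Notes on version B (the rewrite author's own statement) =====
-- stated objective: alternative
-- what changed: Replaces A's single stateful pass (a current-panel dict flushed at each numbered marker and at the end) with a two-pass decomposition: pass 1 splits the cleaned lines into per-panel line groups at the markers, pass 2 maps each group independently to its panel dict; Pre_ excludes inputs where a Footer_Text line precedes the first Panel_Prompt line, on which A's dict key order (footer_text inserted before prompt) is an accident of insertion order while B always emits prompt first.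
import Mathlib
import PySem

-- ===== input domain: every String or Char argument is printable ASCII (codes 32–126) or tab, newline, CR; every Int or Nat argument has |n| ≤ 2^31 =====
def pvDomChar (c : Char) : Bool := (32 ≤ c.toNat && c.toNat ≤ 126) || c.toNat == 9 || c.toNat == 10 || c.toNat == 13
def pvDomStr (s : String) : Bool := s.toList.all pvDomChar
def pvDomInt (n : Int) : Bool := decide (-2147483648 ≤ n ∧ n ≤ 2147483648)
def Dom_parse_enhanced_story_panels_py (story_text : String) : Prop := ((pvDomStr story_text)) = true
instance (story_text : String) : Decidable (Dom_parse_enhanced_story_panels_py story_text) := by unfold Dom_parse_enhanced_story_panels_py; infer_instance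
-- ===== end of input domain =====

-- B re-implements A's single stateful panel-flushing pass as a two-pass group-then-map
-- decomposition (objective: alternative, same cost); Pre_ excludes the inputs where
-- A's dict key order (footer before prompt) is an accident of insertion order.

-- ===== PORT A =====
-- A: one pass over the lines, accumulating a current-panel dict and flushing it
-- into `panels` at each numbered 'Panel_Prompt:' marker and once at the end.

-- flush helper: Python's `if current_panel and 'prompt' in current_panel: ... panels.append(...)`
def pyA_flush (panels : List (List (String × String)))
    (cur : PySem.Dict String String) : List (List (String × String)) :=
  if cur.size ≠ 0 ∧ cur.contains "prompt" then
    panels ++ [(if cur.contains "footer_text" then cur else cur.insert "footer_text" "").items]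
  else panels

-- loop body for one non-empty stripped line
def pyA_line (st : List (List (String × String)) × PySem.Dict String String)
    (line : String) : List (List (String × String)) × PySem.Dict String String :=
  let st :=
    if PySem.Str.strIsdigit (((PySem.Str.split? line ".").getD []).headD "")
        && PySem.Str.isIn "Panel_Prompt:" line then
      (pyA_flush st.1 st.2, PySem.Dict.empty)
    else st
  if PySem.Str.isIn "Panel_Prompt:" line then
    -- parts[1] via pyGet?/getD "" is exact: it is only read under the 1 < parts.length guard
    let parts := (PySem.Str.splitMax? line "Panel_Prompt:" 1).getD []
    if 1 < parts.length then
      (st.1, st.2.insert "prompt" (PySem.Str.strip ((PySem.List.pyGet? parts 1).getD "")))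
    else st
  else if PySem.Str.isIn "Footer_Text:" line then
    let parts := (PySem.Str.splitMax? line "Footer_Text:" 1).getD []
    if 1 < parts.length then
      (st.1, st.2.insert "footer_text" (PySem.Str.strip ((PySem.List.pyGet? parts 1).getD "")))
    else st
  else st

-- `.getD []` on split?/splitMax? is exact: the separators "\n", ".", "Panel_Prompt:",
-- "Footer_Text:" are non-empty, so Python's str.split never raises; `headD ""` is exact
-- because Python's split always returns a non-empty list.
def parse_enhanced_story_panels_py (story_text : String) : List (List (String × String)) :=
  let lines := (PySem.Str.split? (PySem.Str.strip story_text) "\n").getD []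
  let fin := lines.foldl
    (fun st rawline =>
      let line := PySem.Str.strip rawline
      if line = "" then st else pyA_line st line)
    ([], PySem.Dict.empty)
  pyA_flush fin.1 fin.2

-- ===== PORT B =====
-- B: pass 1 groups the cleaned lines at each marker; pass 2 maps each group to a panel.

def pvB_clean (story_text : String) : List String :=
  (((PySem.Str.split? (PySem.Str.strip story_text) "\n").getD []).map
    PySem.Str.strip).filter (fun s => s != "")

def pvB_group (st : List (List String) × List String) (line : String) :
    List (List String) × List String :=
  if PySem.Str.strIsdigit (((PySem.Str.split? line ".").getD []).headD "")
      && PySem.Str.isIn "Panel_Prompt:" line then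
    (st.1 ++ [st.2], [line])
  else
    (st.1, st.2 ++ [line])

-- per-group scan: (last prompt payload, last footer payload)
def pvB_scan (st : Option String × Option String) (line : String) :
    Option String × Option String :=
  if PySem.Str.isIn "Panel_Prompt:" line then
    (some (PySem.Str.strip ((PySem.List.pyGet?
        ((PySem.Str.splitMax? line "Panel_Prompt:" 1).getD []) 1).getD "")), st.2)
  else if PySem.Str.isIn "Footer_Text:" line then
    (st.1,
     some (PySem.Str.strip ((PySem.List.pyGet?
        ((PySem.Str.splitMax? line "Footer_Text:" 1).getD []) 1).getD "")))
  else st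

def pvB_panel? (group : List String) : Option (List (String × String)) :=
  match group.foldl pvB_scan (none, none) with
  | (none, _) => none
  | (some p, f) => some [("prompt", p), ("footer_text", f.getD "")]

def parse_enhanced_story_panels_py_alt (story_text : String) : List (List (String × String)) :=
  let st := (pvB_clean story_text).foldl pvB_group ([], [])
  (st.1 ++ [st.2]).filterMap pvB_panel?

-- ===== PRECONDITION & SPEC =====
-- helpers for Pre_ only (they repeat the line-cleaning and marker tests of the
-- programs so that Pre_'s closure reaches neither port)
def pvPreLines (story_text : String) : List String :=
  (((PySem.Str.split? (PySem.Str.strip story_text) "\n").getD []).map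
    PySem.Str.strip).filter (fun s => s != "")
def pvPreMarker (line : String) : Bool :=
  PySem.Str.strIsdigit (((PySem.Str.split? line ".").getD []).headD "")
    && PySem.Str.isIn "Panel_Prompt:" line

-- Pre_ excludes the inputs where a 'Footer_Text:' line precedes the first
-- 'Panel_Prompt:' line and that first line is not a numbered panel marker: there A's
-- result dict lists footer_text before prompt — an accident of dict insertion order
-- (the same key/value pairs either way) — while B always emits prompt first.
def Pre_parse_enhanced_story_panels_py (story_text : String) : Prop :=
  (let lines := pvPreLines story_text
   let pref := lines.takeWhile (fun l => !PySem.Str.isIn "Panel_Prompt:" l)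
   let rest := lines.dropWhile (fun l => !PySem.Str.isIn "Panel_Prompt:" l)
   pref.all (fun l => !PySem.Str.isIn "Footer_Text:" l) || rest.isEmpty
     || pvPreMarker (rest.headD "")) = true
instance (story_text : String) : Decidable (Pre_parse_enhanced_story_panels_py story_text) := by
  unfold Pre_parse_enhanced_story_panels_py; infer_instance

def pvWitness_parse_enhanced_story_panels_py : String :=
  "1. Panel_Prompt: a cat\nFooter_Text: hello"

def Spec_parse_enhanced_story_panels_py (story_text : String) (out : List (List (String × String))) : Prop := out = parse_enhanced_story_panels_py_alt story_text
instance (story_text : String) (out : List (List (String × String))) : Decidable (Spec_parse_enhanced_story_panels_py story_text out) := by unfold Spec_parse_enhanced_story_panels_py; infer_instance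

-- ===== CLAIM (what is proved, stated in full; the proofs are below) =====
def Claim_equal_parse_enhanced_story_panels_py : Prop := ∀ (story_text : String), Dom_parse_enhanced_story_panels_py story_text → Pre_parse_enhanced_story_panels_py story_text → Spec_parse_enhanced_story_panels_py story_text (parse_enhanced_story_panels_py story_text)

-- ===== LEMMAS AND PROOFS =====

-- abbreviations for the three line tests (proof-side only)
def pvP (l : String) : Bool := PySem.Str.isIn "Panel_Prompt:" l
def pvF (l : String) : Bool := PySem.Str.isIn "Footer_Text:" l
def pvM (l : String) : Bool :=
  PySem.Str.strIsdigit (((PySem.Str.split? l ".").getD []).headD "") && pvP l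

-- A's field-update on the current-panel dict (the tail of pyA_line, dict component only)
def pvField (d : PySem.Dict String String) (line : String) : PySem.Dict String String :=
  if PySem.Str.isIn "Panel_Prompt:" line then
    let parts := (PySem.Str.splitMax? line "Panel_Prompt:" 1).getD []
    if 1 < parts.length then
      d.insert "prompt" (PySem.Str.strip ((PySem.List.pyGet? parts 1).getD ""))
    else d
  else if PySem.Str.isIn "Footer_Text:" line then
    let parts := (PySem.Str.splitMax? line "Footer_Text:" 1).getD []
    if 1 < parts.length then
      d.insert "footer_text" (PySem.Str.strip ((PySem.List.pyGet? parts 1).getD ""))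
    else d
  else d

def pvDictOf (g : List String) : PySem.Dict String String := g.foldl pvField PySem.Dict.empty

-- ghost 3-state scan used only in the proof: like pvB_scan but also tracking
-- whether a footer was recorded before any prompt (the flag that decides A's key order)
def pvScan3 (st : Option String × Option String × Bool) (line : String) :
    Option String × Option String × Bool :=
  if PySem.Str.isIn "Panel_Prompt:" line then
    (some (PySem.Str.strip ((PySem.List.pyGet?
        ((PySem.Str.splitMax? line "Panel_Prompt:" 1).getD []) 1).getD "")), st.2.1, st.2.2)
  else if PySem.Str.isIn "Footer_Text:" line then
    (st.1,
     some (PySem.Str.strip ((PySem.List.pyGet?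
        ((PySem.Str.splitMax? line "Footer_Text:" 1).getD []) 1).getD "")),
     if st.1 = none ∧ st.2.1 = none then true else st.2.2)
  else st

-- the dict a ghost-scan state denotes (key order: footer first iff the flag is set)
def pvRD (s : Option String × Option String × Bool) : PySem.Dict String String :=
  match s with
  | (none, none, _) => PySem.Dict.empty
  | (some pv, none, _) => PySem.Dict.empty.insert "prompt" pv
  | (none, some fv, _) => PySem.Dict.empty.insert "footer_text" fv
  | (some pv, some fv, ff) =>
    if ff then (PySem.Dict.empty.insert "footer_text" fv).insert "prompt" pv
    else (PySem.Dict.empty.insert "prompt" pv).insert "footer_text" fv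

-- reachability invariant of ghost-scan states
def pvPhi (s : Option String × Option String × Bool) : Prop :=
  (s.2.2 = true → s.2.1 ≠ none) ∧ (s.2.1 ≠ none → s.1 = none → s.2.2 = true)

-- the panel a ghost-scan state renders (A's key order)
def pvRender (s : Option String × Option String × Bool) : Option (List (String × String)) :=
  match s with
  | (none, _, _) => none
  | (some p, f, ff) =>
    if ff then some [("footer_text", f.getD ""), ("prompt", p)]
    else some [("prompt", p), ("footer_text", f.getD "")]

def pvPanel3 (group : List String) : Option (List (String × String)) :=
  pvRender (group.foldl pvScan3 (none, none, false))

-- grouping of cleaned lines, recursively (reference form shared by both directions)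
def pvGroupsRec (cur : List String) : List String → List (List String)
  | [] => [cur]
  | l :: ls =>
    if PySem.Str.strIsdigit (((PySem.Str.split? l ".").getD []).headD "")
        && PySem.Str.isIn "Panel_Prompt:" l then
      cur :: pvGroupsRec [l] ls
    else
      pvGroupsRec (cur ++ [l]) ls

theorem pv_go0_len (sep : List Char) (fuel : Nat) (l cur : List Char) (acc : List (List Char)) :
    (PySem.Chars.splitOnMax.go sep fuel 0 l cur acc).length = acc.length + 1 := by
  cases fuel with
  | zero => simp [PySem.Chars.splitOnMax.go]
  | succ n => cases l <;> simp [PySem.Chars.splitOnMax.go]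

theorem pv_go1_len (sep : List Char) (hsep : sep ≠ []) :
    ∀ (fuel : Nat) (l cur : List Char) (acc : List (List Char)),
    l.length < fuel → sep <:+: l → 2 ≤ (PySem.Chars.splitOnMax.go sep fuel 1 l cur acc).length := by
  intro fuel
  induction fuel with
  | zero => intro l cur acc h _; omega
  | succ n ih =>
    intro l cur acc hlen hinf
    cases l with
    | nil => exact absurd (List.eq_nil_of_infix_nil hinf) hsep
    | cons c rest =>
      rw [PySem.Chars.splitOnMax.go]
      simp only [if_neg (by omega : ¬ (1 : Nat) = 0)]
      by_cases hp : sep.isPrefixOf (c :: rest) = true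
      · rw [if_pos hp, pv_go0_len]; simp
      · rw [if_neg hp]
        apply ih
        · simpa using Nat.lt_of_succ_lt_succ hlen
        · rcases List.infix_cons_iff.mp hinf with h | h
          · exact absurd (List.isPrefixOf_iff_prefix.mpr h) hp
          · exact h

-- when `sub in line`, Python's line.split(sub, 1) has at least two parts
theorem pv_split_len (line sub : String) (hsub : sub.toList ≠ [])
    (h : PySem.Str.isIn sub line = true) :
    1 < ((PySem.Str.splitMax? line sub 1).getD []).length := by
  have hinf : sub.toList <:+: line.toList := (PySem.Str.isIn_iff_infix _ _).mp h
  have : 2 ≤ (PySem.Chars.splitOnMax line.toList sub.toList 1).length := by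
    rw [PySem.Chars.splitOnMax]
    rw [if_neg (by omega : ¬ (1 : Int) < 0)]
    exact pv_go1_len sub.toList hsub _ _ _ _ (by omega) hinf
  simp only [PySem.Str.splitMax?, PySem.Chars.splitMax?]
  rw [if_neg (by simpa using hsub)]
  simpa using this

-- overwriting a key of a two-key dict keeps the insertion order
theorem pv_overwrite_prompt (pv fv w : String) :
    ((PySem.Dict.empty.insert "prompt" pv).insert "footer_text" fv).insert "prompt" w
      = (PySem.Dict.empty.insert "prompt" w).insert "footer_text" fv := by
  apply PySem.Dict.ext
  rw [PySem.Dict.items_insert_of_contains, PySem.Dict.items_insert_of_not_contains,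
    PySem.Dict.items_insert_of_not_contains, PySem.Dict.items_insert_of_not_contains]
  · simp [PySem.Dict.items_insert_of_not_contains, PySem.Dict.empty]
  all_goals simp [PySem.Dict.contains_insert, PySem.Dict.contains_empty]

theorem pv_overwrite_footer (fv pv w : String) :
    ((PySem.Dict.empty.insert "footer_text" fv).insert "prompt" pv).insert "footer_text" w
      = (PySem.Dict.empty.insert "footer_text" w).insert "prompt" pv := by
  apply PySem.Dict.ext
  rw [PySem.Dict.items_insert_of_contains, PySem.Dict.items_insert_of_not_contains,
    PySem.Dict.items_insert_of_not_contains, PySem.Dict.items_insert_of_not_contains]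
  · simp [PySem.Dict.items_insert_of_not_contains, PySem.Dict.empty]
  all_goals simp [PySem.Dict.contains_insert, PySem.Dict.contains_empty]

-- one ghost step preserves the state/dict correspondence and the invariant
theorem pv_step_inv (s : Option String × Option String × Bool) (l : String) (hs : pvPhi s) :
    pvField (pvRD s) l = pvRD (pvScan3 s l) ∧ pvPhi (pvScan3 s l) := by
  obtain ⟨p, f, ff⟩ := s
  by_cases hp : PySem.Str.isIn "Panel_Prompt:" l = true
  · have hlen : 1 < ((PySem.Str.splitMax? l "Panel_Prompt:" 1).getD []).length :=
      pv_split_len l _ (by decide) hp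
    cases p <;> cases f <;>
      (try cases ff) <;>
      simp_all [pvField, pvScan3, pvRD, pvPhi, pv_overwrite_prompt,
        PySem.Dict.insert_insert_self]
  · by_cases hf : PySem.Str.isIn "Footer_Text:" l = true
    · have hlen : 1 < ((PySem.Str.splitMax? l "Footer_Text:" 1).getD []).length :=
        pv_split_len l _ (by decide) hf
      cases p <;> cases f <;>
        (try cases ff) <;>
        simp_all [pvField, pvScan3, pvRD, pvPhi, pv_overwrite_footer,
          PySem.Dict.insert_insert_self]
    · cases p <;> cases f <;> simp_all [pvField, pvScan3, pvRD, pvPhi]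

theorem pv_fold_inv (g : List String) :
    ∀ s, pvPhi s →
      g.foldl pvField (pvRD s) = pvRD (g.foldl pvScan3 s) ∧ pvPhi (g.foldl pvScan3 s) := by
  induction g with
  | nil => intro s hs; exact ⟨rfl, hs⟩
  | cons l g ih =>
    intro s hs
    obtain ⟨h1, h2⟩ := pv_step_inv s l hs
    simpa [h1] using ih (pvScan3 s l) h2

theorem pv_dictOf_eq (g : List String) :
    pvDictOf g = pvRD (g.foldl pvScan3 (none, none, false)) :=
  (pv_fold_inv g (none, none, false) (by simp [pvPhi])).1

theorem pv_phi_scan (g : List String) : pvPhi (g.foldl pvScan3 (none, none, false)) :=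
  (pv_fold_inv g (none, none, false) (by simp [pvPhi])).2

-- flushing the dict of a ghost state appends exactly the rendered panel
theorem pv_flush_render (s : Option String × Option String × Bool) (hs : pvPhi s)
    (ps : List (List (String × String))) :
    pyA_flush ps (pvRD s) = ps ++ (pvRender s).toList := by
  obtain ⟨p, f, ff⟩ := s
  cases p <;> cases f <;> cases ff <;>
    simp_all [pvRD, pvRender, pvPhi, pyA_flush, PySem.Dict.size,
      PySem.Dict.items_insert_of_not_contains,
      PySem.Dict.contains_insert, PySem.Dict.empty]

theorem pv_flush_group (g : List String) (ps : List (List (String × String))) :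
    pyA_flush ps (pvDictOf g) = ps ++ (pvPanel3 g).toList := by
  rw [pv_dictOf_eq]
  exact pv_flush_render _ (pv_phi_scan g) ps

-- A's loop body, decomposed into flush-on-marker plus the field update
theorem pv_line_decomp (ps : List (List (String × String))) (d : PySem.Dict String String)
    (l : String) :
    pyA_line (ps, d) l =
      if PySem.Str.strIsdigit (((PySem.Str.split? l ".").getD []).headD "")
          && PySem.Str.isIn "Panel_Prompt:" l then
        (pyA_flush ps d, pvField PySem.Dict.empty l)
      else (ps, pvField d l) := by
  unfold pyA_line pvField
  split_ifs <;> dsimp only <;> first | rfl | (split <;> rfl)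

-- main induction: A's flush-as-you-go pass equals ghost group-then-map over the same lines
theorem pv_main (ls : List String) :
    ∀ (ps : List (List (String × String))) (cur : List String),
      pyA_flush (ls.foldl pyA_line (ps, pvDictOf cur)).1 (ls.foldl pyA_line (ps, pvDictOf cur)).2
        = ps ++ (pvGroupsRec cur ls).filterMap pvPanel3 := by
  induction ls with
  | nil =>
    intro ps cur
    simpa [pvGroupsRec, List.filterMap_cons] using pv_flush_group cur ps
  | cons l ls ih =>
    intro ps cur
    by_cases hm : (PySem.Str.strIsdigit (((PySem.Str.split? l ".").getD []).headD "")
        && PySem.Str.isIn "Panel_Prompt:" l) = true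
    · have hstep : pyA_line (ps, pvDictOf cur) l = (pyA_flush ps (pvDictOf cur), pvDictOf [l]) := by
        rw [pv_line_decomp, if_pos hm]; rfl
      calc pyA_flush ((l :: ls).foldl pyA_line (ps, pvDictOf cur)).1
              ((l :: ls).foldl pyA_line (ps, pvDictOf cur)).2
          = pyA_flush (ls.foldl pyA_line (pyA_flush ps (pvDictOf cur), pvDictOf [l])).1
              (ls.foldl pyA_line (pyA_flush ps (pvDictOf cur), pvDictOf [l])).2 := by
              rw [List.foldl_cons, hstep]
        _ = pyA_flush ps (pvDictOf cur) ++ (pvGroupsRec [l] ls).filterMap pvPanel3 := ih _ _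
        _ = ps ++ (pvGroupsRec cur (l :: ls)).filterMap pvPanel3 := by
              rw [pv_flush_group, pvGroupsRec, if_pos hm, List.filterMap_cons]
              cases h : pvPanel3 cur <;> simp
    · have hstep : pyA_line (ps, pvDictOf cur) l = (ps, pvDictOf (cur ++ [l])) := by
        rw [pv_line_decomp, if_neg hm, pvDictOf, pvDictOf, List.foldl_append]; rfl
      calc pyA_flush ((l :: ls).foldl pyA_line (ps, pvDictOf cur)).1
              ((l :: ls).foldl pyA_line (ps, pvDictOf cur)).2
          = pyA_flush (ls.foldl pyA_line (ps, pvDictOf (cur ++ [l]))).1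
              (ls.foldl pyA_line (ps, pvDictOf (cur ++ [l]))).2 := by
              rw [List.foldl_cons, hstep]
        _ = ps ++ (pvGroupsRec (cur ++ [l]) ls).filterMap pvPanel3 := ih _ _
        _ = ps ++ (pvGroupsRec cur (l :: ls)).filterMap pvPanel3 := by
              rw [pvGroupsRec, if_neg hm]

-- A's inline strip-and-skip loop is the loop over the cleaned lines
theorem pv_foldl_clean (init : List (List (String × String)) × PySem.Dict String String)
    (ls : List String) :
    ls.foldl (fun st raw =>
        if PySem.Str.strip raw = "" then st else pyA_line st (PySem.Str.strip raw)) init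
      = ((ls.map PySem.Str.strip).filter (fun s => s != "")).foldl pyA_line init := by
  induction ls generalizing init with
  | nil => rfl
  | cons l ls ih =>
    by_cases h : PySem.Str.strip l = "" <;>
      simp [h, ih]

-- B's grouping fold produces exactly the recursive grouping
theorem pv_group_fold (ls : List String) :
    ∀ (gs : List (List String)) (cur : List String),
      (ls.foldl pvB_group (gs, cur)).1 ++ [(ls.foldl pvB_group (gs, cur)).2]
        = gs ++ pvGroupsRec cur ls := by
  induction ls with
  | nil => intro gs cur; simp [pvGroupsRec]
  | cons l ls ih =>
    intro gs cur
    by_cases hm : (PySem.Str.strIsdigit (((PySem.Str.split? l ".").getD []).headD "")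
        && PySem.Str.isIn "Panel_Prompt:" l) = true
    · rw [List.foldl_cons, pvB_group, if_pos hm, pvGroupsRec, if_pos hm]
      rw [ih]
      simp
    · rw [List.foldl_cons, pvB_group, if_neg hm, pvGroupsRec, if_neg hm]
      exact ih _ _

-- ====== bridging the ghost scan to B's 2-state scan under Pre_ ======

-- B's scan is the projection of the ghost scan
theorem pv_proj (g : List String) : ∀ s : Option String × Option String × Bool,
    g.foldl pvB_scan (s.1, s.2.1) = ((g.foldl pvScan3 s).1, (g.foldl pvScan3 s).2.1) := by
  induction g with
  | nil => intro s; rfl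
  | cons l g ih =>
    intro s
    have hstep : pvB_scan (s.1, s.2.1) l = ((pvScan3 s l).1, (pvScan3 s l).2.1) := by
      unfold pvB_scan pvScan3; split_ifs <;> rfl
    rw [List.foldl_cons, List.foldl_cons, hstep]
    exact ih (pvScan3 s l)

-- once a prompt is set, it stays set and the footer-first flag never changes
theorem pv_ff_stable (g : List String) : ∀ s : Option String × Option String × Bool,
    s.1 ≠ none →
    (g.foldl pvScan3 s).1 ≠ none ∧ (g.foldl pvScan3 s).2.2 = s.2.2 := by
  induction g with
  | nil => intro s h; exact ⟨h, rfl⟩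
  | cons l g ih =>
    intro s h
    have hstep : (pvScan3 s l).1 ≠ none ∧ (pvScan3 s l).2.2 = s.2.2 := by
      obtain ⟨p, f, ff⟩ := s
      cases p with
      | none => simp at h
      | some pv => unfold pvScan3; split_ifs <;> simp_all
    rw [List.foldl_cons]
    obtain ⟨h1, h2⟩ := ih (pvScan3 s l) hstep.1
    exact ⟨h1, h2.trans hstep.2⟩

-- a group whose pre-prompt prefix has no footer line ends with the flag unset
theorem pv_good_ff (g : List String)
    (hg : ∀ l ∈ g.takeWhile (fun l => !pvP l), pvF l = false) :
    (g.foldl pvScan3 (none, none, false)).2.2 = false := by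
  induction g with
  | nil => rfl
  | cons l g ih =>
    by_cases hp : pvP l = true
    · rw [List.foldl_cons]
      have : (pvScan3 (none, none, false) l).1 ≠ none ∧
          (pvScan3 (none, none, false) l).2.2 = (false : Bool) := by
        unfold pvScan3
        rw [if_pos (show PySem.Str.isIn "Panel_Prompt:" l = true from hp)]
        simp
      exact ((pv_ff_stable g _ this.1).2).trans this.2
    · have hmem : l ∈ (l :: g).takeWhile (fun l => !pvP l) := by
        rw [List.takeWhile_cons_of_pos (by simp [hp])]; exact List.mem_cons_self
      have hf : pvF l = false := hg l hmem
      have hstep : pvScan3 (none, none, false) l = (none, none, false) := by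
        unfold pvScan3
        rw [if_neg (show ¬ PySem.Str.isIn "Panel_Prompt:" l = true from hp),
          if_neg (show ¬ PySem.Str.isIn "Footer_Text:" l = true by
            rw [show PySem.Str.isIn "Footer_Text:" l = pvF l from rfl, hf]; simp)]
      rw [List.foldl_cons, hstep]
      exact ih (fun x hx => hg x (by
        rw [List.takeWhile_cons_of_pos (by simp [hp])]; exact List.mem_cons_of_mem _ hx))

-- a group with no prompt line ends with no prompt recorded
theorem pv_noP_none : ∀ (g : List String), (∀ l ∈ g, pvP l = false) →
    ∀ s : Option String × Option String × Bool, s.1 = none →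
      (g.foldl pvScan3 s).1 = none := by
  intro g
  induction g with
  | nil => intro _ s h; exact h
  | cons l g ih =>
    intro hg s h
    have hpl : ¬ PySem.Str.isIn "Panel_Prompt:" l = true := by
      rw [show PySem.Str.isIn "Panel_Prompt:" l = pvP l from rfl,
        hg l List.mem_cons_self]; simp
    have hstep : (pvScan3 s l).1 = none := by
      unfold pvScan3
      rw [if_neg hpl]
      split_ifs <;> simpa using h
    rw [List.foldl_cons]
    exact ih (fun x hx => hg x (List.mem_cons_of_mem _ hx)) _ hstep

-- per-group agreement: pre-prompt prefix footer-free, or no prompt line at all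
def pvOkGroup (g : List String) : Prop :=
  (∀ l ∈ g.takeWhile (fun l => !pvP l), pvF l = false) ∨ (∀ l ∈ g, pvP l = false)

theorem pv_panel_agree (g : List String) (hg : pvOkGroup g) :
    pvPanel3 g = pvB_panel? g := by
  unfold pvPanel3 pvB_panel? pvRender
  rw [pv_proj g (none, none, false)]
  cases hg with
  | inr hnoP =>
    have h1 := pv_noP_none g hnoP (none, none, false) rfl
    generalize ht : g.foldl pvScan3 (none, none, false) = t at h1 ⊢
    obtain ⟨p, f, ff⟩ := t
    cases p
    · rfl
    · simp at h1
  | inl hgood =>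
    have hff := pv_good_ff g hgood
    generalize ht : g.foldl pvScan3 (none, none, false) = t at hff ⊢
    obtain ⟨p, f, ff⟩ := t
    subst hff
    cases p <;> rfl

-- unfolding equation of the recursive grouping, guard phrased via pvM
theorem pvGroupsRec_cons (cur : List String) (l : String) (ls : List String) :
    pvGroupsRec cur (l :: ls)
      = if pvM l then cur :: pvGroupsRec [l] ls else pvGroupsRec (cur ++ [l]) ls := rfl

-- membership in a list with known head splits into head or tail
theorem pv_mem_of_head? {α : Type} {L : List α} {x h0 : α}
    (hh : L.head? = some h0) (hx : x ∈ L) : x = h0 ∨ x ∈ L.tail := by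
  cases L with
  | nil => simp at hh
  | cons a t =>
    simp only [List.head?_cons, Option.some.injEq] at hh
    subst hh
    simpa using List.mem_cons.mp hx

-- structure of the recursive grouping: head group, and marker-headed tail groups
theorem pv_groups_head (ls : List String) : ∀ cur,
    (pvGroupsRec cur ls).head? = some (cur ++ ls.takeWhile (fun l => !pvM l)) := by
  induction ls with
  | nil => intro cur; simp [pvGroupsRec]
  | cons l ls ih =>
    intro cur
    by_cases hm : pvM l = true
    · rw [pvGroupsRec_cons, if_pos hm, List.takeWhile_cons_of_neg (by simp [hm])]
      simp
    · rw [pvGroupsRec_cons, if_neg hm,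
        List.takeWhile_cons_of_pos (by simp [Bool.not_eq_true] at hm ⊢; exact hm), ih]
      simp

theorem pv_groups_tail : ∀ (ls cur g : List String),
    g ∈ (pvGroupsRec cur ls).tail → ∃ l' t, g = l' :: t ∧ pvM l' = true := by
  intro ls
  induction ls with
  | nil => intro cur g h; simp [pvGroupsRec] at h
  | cons l ls ih =>
    intro cur g h
    by_cases hm : pvM l = true
    · rw [pvGroupsRec_cons, if_pos hm, List.tail_cons] at h
      rcases pv_mem_of_head? (pv_groups_head ls [l]) h with h | h
      · exact ⟨l, ls.takeWhile (fun l => !pvM l), by rw [h]; rfl, hm⟩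
      · exact ih [l] g h
    · rw [pvGroupsRec_cons, if_neg hm] at h
      exact ih _ g h

-- under Pre_, every group of the cleaned lines is ok

-- the ¬P-prefix of the ¬M-prefix is the ¬P-prefix (a P-free line is marker-free)
theorem pv_tw (L : List String) :
    (L.takeWhile (fun l => !pvM l)).takeWhile (fun l => !pvP l)
      = L.takeWhile (fun l => !pvP l) := by
  induction L with
  | nil => rfl
  | cons a L ihL =>
    by_cases hpa : pvP a = true
    · by_cases hma : pvM a = true
      · rw [List.takeWhile_cons_of_neg (by simp [hma]),
          List.takeWhile_cons_of_neg (by simp [hpa])]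
        rfl
      · rw [List.takeWhile_cons_of_pos (by simp [Bool.not_eq_true] at hma ⊢; exact hma),
          List.takeWhile_cons_of_neg (by simp [hpa]),
          List.takeWhile_cons_of_neg (by simp [hpa])]
    · have hpa' : pvP a = false := by simpa using hpa
      have hma : pvM a = false := by unfold pvM; rw [hpa']; simp
      rw [List.takeWhile_cons_of_pos (by simp [hma]),
        List.takeWhile_cons_of_pos (by simp [hpa']),
        List.takeWhile_cons_of_pos (by simp [hpa']), ihL]

-- if the first P line is a marker, the pre-marker prefix has no P line
theorem pv_mk_noP : ∀ (L : List String),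
    pvM ((L.dropWhile (fun l => !pvP l)).headD "") = true →
    ∀ l ∈ L.takeWhile (fun l => !pvM l), pvP l = false := by
  intro L
  induction L with
  | nil => simp
  | cons a L ihL =>
    intro hmk l hl
    by_cases hpa : pvP a = true
    · have hma : pvM a = true := by
        rw [List.dropWhile_cons_of_neg (by simp [hpa])] at hmk
        simpa using hmk
      rw [List.takeWhile_cons_of_neg (by simp [hma])] at hl
      simp at hl
    · have hpa' : pvP a = false := by simpa using hpa
      have hma : pvM a = false := by unfold pvM; rw [hpa']; simp
      rw [List.dropWhile_cons_of_pos (by simp [hpa'])] at hmk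
      rw [List.takeWhile_cons_of_pos (by simp [hma])] at hl
      rcases List.mem_cons.mp hl with h3 | h3
      · rw [h3]; exact hpa'
      · exact ihL hmk l h3

theorem pv_groups_ok (story_text : String)
    (hpre : Pre_parse_enhanced_story_panels_py story_text) :
    ∀ g ∈ pvGroupsRec [] (pvB_clean story_text), pvOkGroup g := by
  intro g hg
  rcases pv_mem_of_head? (pv_groups_head (pvB_clean story_text) []) hg with hhead | htail
  · -- the initial group: the lines before the first numbered marker
    have hg' : g = (pvB_clean story_text).takeWhile (fun l => !pvM l) := by
      simpa using hhead
    have hpre' : (((pvB_clean story_text).takeWhile (fun l => !pvP l)).all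
          (fun l => !pvF l)
        || ((pvB_clean story_text).dropWhile (fun l => !pvP l)).isEmpty
        || pvM (((pvB_clean story_text).dropWhile (fun l => !pvP l)).headD ""))
        = true := hpre
    simp only [Bool.or_eq_true] at hpre'
    rcases hpre' with (hp | hr) | hmk
    · -- no footer line before the first Panel_Prompt line
      left
      intro l hl
      rw [hg', pv_tw] at hl
      simpa using List.all_eq_true.mp hp l hl
    · -- no Panel_Prompt line at all
      right
      intro l hl
      have hnil : (pvB_clean story_text).dropWhile (fun l => !pvP l) = [] := by
        simpa using hr
      have hmem : l ∈ pvB_clean story_text :=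
        List.IsPrefix.mem (hg' ▸ hl) (List.takeWhile_prefix _)
      simpa using List.dropWhile_eq_nil_iff.mp hnil l hmem
    · -- the first Panel_Prompt line is itself a numbered marker
      right
      intro l hl
      exact pv_mk_noP _ hmk l (hg' ▸ hl)
  · -- marker-headed groups: the ¬P prefix is empty
    obtain ⟨l', t, hgt, hml⟩ := pv_groups_tail _ _ _ htail
    left
    intro l hl
    have hpl : pvP l' = true := Bool.and_elim_right hml
    rw [hgt, List.takeWhile_cons_of_neg (by simp [hpl])] at hl
    simp at hl

-- ===== VERDICT (by name: the statement is the Claim_ definition above) =====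
theorem parse_enhanced_story_panels_py_spec : Claim_equal_parse_enhanced_story_panels_py := by
  intro story_text _ hpre
  show parse_enhanced_story_panels_py story_text = parse_enhanced_story_panels_py_alt story_text
  simp only [parse_enhanced_story_panels_py, parse_enhanced_story_panels_py_alt]
  rw [pv_foldl_clean]
  have hA := pv_main (pvB_clean story_text) [] []
  have hB := pv_group_fold (pvB_clean story_text) [] []
  simp only [pvDictOf, List.foldl_nil, List.nil_append] at hA hB
  have hcong : (pvGroupsRec [] (pvB_clean story_text)).filterMap pvPanel3
      = (pvGroupsRec [] (pvB_clean story_text)).filterMap pvB_panel? :=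
    List.filterMap_congr (fun g hg => pv_panel_agree g (pv_groups_ok story_text hpre g hg))
  simp only [pvB_clean] at hA hB ⊢
  rw [hA, hB, ← pvB_clean, hcong]
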